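-- pv_equiv track=rewrite | github.com/japaiva/synchrobi | gestor/management/commands/preencher_pais.py | deduzir_pai
-- ===== SOURCE A (Python) =====
-- def deduzir_pai(codigo, items_dict):
--     """
--     Deduz o pai de um código baseado na estrutura existente
--     Tenta diferentes possibilidades do mais específico para o mais geral
--     """
--     if '.' not in codigo:
--         return None  # É raiz
--
--     partes = codigo.split('.')
--
--     # Tentar diferentes possibilidades de pai
--     for i in range(len(partes) - 1, 0, -1):
--         codigo_pai_candidato = '.'.join(partes[:i])
--
--         if codigo_pai_candidato in items_dict:
--             return codigo_pai_candidato
--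
--     return None
-- ===== SOURCE B (Python) =====
-- def deduzir_pai(codigo, items_dict):
--     """Recursion over the parent chain: strip the last dotted segment per step."""
--     if '.' not in codigo:
--         return None
--     pai = codigo.rsplit('.', 1)[0]
--     if pai in items_dict:
--         return pai
--     return deduzir_pai(pai, items_dict)
-- ===== Notes on version B (the rewrite author's own statement) =====
-- stated objective: simpler
-- what changed: Replaced the split-into-parts + index loop that rejoins a prefix per iteration with a direct recursion over the parent chain that strips one trailing '.segment' per call via rsplit, never materialising the parts list.
import Mathlib
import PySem

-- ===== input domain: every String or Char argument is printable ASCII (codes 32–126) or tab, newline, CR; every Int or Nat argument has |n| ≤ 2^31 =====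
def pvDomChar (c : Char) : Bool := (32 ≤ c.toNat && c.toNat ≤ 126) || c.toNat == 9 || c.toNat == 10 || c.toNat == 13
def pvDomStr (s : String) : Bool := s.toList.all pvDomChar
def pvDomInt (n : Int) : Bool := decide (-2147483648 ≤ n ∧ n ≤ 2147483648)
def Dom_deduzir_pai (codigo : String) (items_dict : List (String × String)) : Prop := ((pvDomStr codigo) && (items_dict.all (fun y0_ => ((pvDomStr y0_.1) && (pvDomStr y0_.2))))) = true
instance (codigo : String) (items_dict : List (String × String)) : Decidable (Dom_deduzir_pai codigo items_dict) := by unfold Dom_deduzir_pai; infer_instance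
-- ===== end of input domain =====

-- B replaces A's parts-list + prefix-rejoin loop by a recursion that strips one trailing '.segment' per call (simpler decomposition; return values proved equal).

-- ===== PORT A =====
-- one iteration of A's 'for i in range(len(partes)-1, 0, -1)' loop body (early return = Option accumulator)
def pvAstep (items_dict : List (String × String)) (partes : List (List Char))
    (acc : Option String) (i : Int) : Option String :=
  match acc with
  | some r => some r
  | none =>
    let cand := PySem.Chars.join ['.'] (PySem.List.slice partes none (some i))
    if items_dict.any (fun p => p.1.toList == cand) then some (String.ofList cand) else none

def deduzir_pai (codigo : String) (items_dict : List (String × String)) : Option String :=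
  if PySem.Chars.isIn ['.'] codigo.toList = false then none
  else
    let partes := PySem.Chars.splitOn codigo.toList ['.']
    (PySem.List.pyRange ((partes.length : Int) - 1) 0 (-1)).foldl (pvAstep items_dict partes) none

-- ===== PORT B =====
-- exact hand port of codigo.rsplit('.', 1)[0] for the case '.' in codigo:
-- the characters strictly before the LAST '.' of cs
def pvRsplitHead (cs : List Char) : List Char :=
  ((cs.reverse.dropWhile (fun c => c != '.')).tail).reverse

theorem pvRsplitHead_length_lt (cs : List Char) (h : '.' ∈ cs) :
    (pvRsplitHead cs).length < cs.length := by
  unfold pvRsplitHead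
  have hne : cs.reverse.dropWhile (fun c => c != '.') ≠ [] := by
    intro hnil
    have : ∀ c ∈ cs.reverse, (fun c => c != '.') c = true := by
      intro c hc
      have := List.dropWhile_eq_nil_iff.mp hnil
      exact this c hc
    have := this '.' (List.mem_reverse.mpr h)
    simp at this
  have h1 : (cs.reverse.dropWhile (fun c => c != '.')).length ≤ cs.length := by
    calc (cs.reverse.dropWhile (fun c => c != '.')).length
        ≤ cs.reverse.length := List.length_dropWhile_le _ _
      _ = cs.length := List.length_reverse
  have h2 : 0 < (cs.reverse.dropWhile (fun c => c != '.')).length :=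
    List.length_pos_iff.mpr hne
  simp only [List.length_reverse, List.length_tail]
  omega

def pvBgo (items_dict : List (String × String)) (cs : List Char) : Option String :=
  if _h : PySem.Chars.isIn ['.'] cs = false then none
  else
    let pai := pvRsplitHead cs
    if items_dict.any (fun p => p.1.toList == pai) then some (String.ofList pai)
    else pvBgo items_dict pai
termination_by cs.length
decreasing_by
  have hmem : '.' ∈ cs := by
    have := (PySem.Chars.isIn_iff_infix ['.'] cs).mp (by simpa using _h)
    exact this.subset (by simp)
  exact pvRsplitHead_length_lt cs hmem

def deduzir_pai_alt (codigo : String) (items_dict : List (String × String)) : Option String :=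
  pvBgo items_dict codigo.toList

-- ===== PRECONDITION & SPEC =====
def Spec_deduzir_pai (codigo : String) (items_dict : List (String × String)) (out : Option String) : Prop := out = deduzir_pai_alt codigo items_dict
instance (codigo : String) (items_dict : List (String × String)) (out : Option String) : Decidable (Spec_deduzir_pai codigo items_dict out) := by unfold Spec_deduzir_pai; infer_instance

-- ===== CLAIM (what is proved, stated in full; the proofs are below) =====
def Claim_equal_deduzir_pai : Prop := ∀ (codigo : String) (items_dict : List (String × String)), Dom_deduzir_pai codigo items_dict → Spec_deduzir_pai codigo items_dict (deduzir_pai codigo items_dict)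

-- ===== LEMMAS AND PROOFS =====

-- a clean structural model of PySem.Chars.splitOn for the one-character separator '.'
def pvSp (l : List Char) : List (List Char) :=
  match l with
  | [] => [[]]
  | c :: rest => if c = '.' then [] :: pvSp rest else (pvSp rest).modifyHead (c :: ·)

theorem pvSp_length_pos (l : List Char) : 0 < (pvSp l).length := by
  induction l with
  | nil => simp [pvSp]
  | cons c rest ih =>
    by_cases h : c = '.' <;> simp [pvSp, h, ih]

theorem pvSp_ne_nil (l : List Char) : pvSp l ≠ [] := by
  have := pvSp_length_pos l
  intro h; simp [h] at this

theorem pvGo_eq (fuel : Nat) : ∀ (l cur : List Char) (acc : List (List Char)),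
    l.length < fuel →
    PySem.Chars.splitOn.go ['.'] fuel l cur acc
      = acc.reverse ++ (pvSp l).modifyHead (cur.reverse ++ ·) := by
  induction fuel with
  | zero => intro l cur acc h; omega
  | succ n ih =>
    intro l cur acc h
    cases l with
    | nil =>
      simp [PySem.Chars.splitOn.go, pvSp]
    | cons c rest =>
      by_cases hc : c = '.'
      · subst hc
        have hpre : List.isPrefixOf ['.'] ('.' :: rest) = true := by
          simp [List.isPrefixOf]
        rw [show PySem.Chars.splitOn.go ['.'] (n+1) ('.' :: rest) cur acc
              = PySem.Chars.splitOn.go ['.'] n (List.drop 1 ('.' :: rest)) [] (cur.reverse :: acc) by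
          simp [PySem.Chars.splitOn.go, hpre]]
        rw [ih (List.drop 1 ('.' :: rest)) [] (cur.reverse :: acc) (by simp at h ⊢; omega)]
        rcases hsp : pvSp rest with _ | ⟨p, t⟩
        · exact absurd hsp (pvSp_ne_nil rest)
        · simp [pvSp, hsp]
      · have hpre : List.isPrefixOf ['.'] (c :: rest) = false := by
          simp [List.isPrefixOf]
          intro hcc; exact hc hcc.symm
        rw [show PySem.Chars.splitOn.go ['.'] (n+1) (c :: rest) cur acc
              = PySem.Chars.splitOn.go ['.'] n rest (c :: cur) acc by
          simp [PySem.Chars.splitOn.go, hpre]]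
        rw [ih rest (c :: cur) acc (by simp at h ⊢; omega)]
        rcases hsp : pvSp rest with _ | ⟨p, t⟩
        · exact absurd hsp (pvSp_ne_nil rest)
        · simp [pvSp, hc, hsp]

theorem splitOn_eq_pvSp (cs : List Char) : PySem.Chars.splitOn cs ['.'] = pvSp cs := by
  unfold PySem.Chars.splitOn
  rw [pvGo_eq (cs.length + 1) cs [] [] (by omega)]
  simp
  exact congrFun List.modifyHead_id (pvSp cs)

theorem join_pvSp (l : List Char) : PySem.Chars.join ['.'] (pvSp l) = l := by
  induction l with
  | nil => simp [pvSp, PySem.Chars.join_singleton]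
  | cons c rest ih =>
    rcases hsp : pvSp rest with _ | ⟨p, t⟩
    · exact absurd hsp (pvSp_ne_nil rest)
    · by_cases hc : c = '.'
      · subst hc
        simp only [pvSp, hsp, reduceIte]
        rw [PySem.Chars.join_cons_cons]
        rw [hsp] at ih; rw [ih]; rfl
      · simp only [pvSp, if_neg hc, hsp, List.modifyHead_cons]
        rw [hsp] at ih
        cases t with
        | nil => simp [PySem.Chars.join_singleton] at ih ⊢; rw [ih]
        | cons q t' =>
          rw [PySem.Chars.join_cons_cons] at ih ⊢
          rw [← ih]; rfl

theorem pvSp_no_dot (l : List Char) : ∀ p ∈ pvSp l, '.' ∉ p := by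
  induction l with
  | nil => simp [pvSp]
  | cons c rest ih =>
    rcases hsp : pvSp rest with _ | ⟨p, t⟩
    · exact absurd hsp (pvSp_ne_nil rest)
    · by_cases hc : c = '.'
      · subst hc
        simp only [pvSp, reduceIte]
        intro q hq
        rcases List.mem_cons.mp hq with h | h
        · subst h; simp
        · exact ih q (hsp ▸ h)
      · simp only [pvSp, if_neg hc, hsp, List.modifyHead_cons]
        intro q hq
        rcases List.mem_cons.mp hq with h | h
        · subst h
          intro hmem
          rcases List.mem_cons.mp hmem with h' | h'
          · exact hc h'.symm
          · exact ih p (hsp ▸ List.mem_cons_self ..) h'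
        · exact ih q (hsp ▸ List.mem_cons_of_mem _ h)

theorem pvMemIsIn (cs : List Char) (h : '.' ∈ cs) : PySem.Chars.isIn ['.'] cs = true := by
  rw [PySem.Chars.isIn_iff_infix]
  obtain ⟨s, t, rfl⟩ := List.append_of_mem h
  exact ⟨s, t, by simp⟩

theorem pvJoin_concat (qs : List (List Char)) (hq : qs ≠ []) (y : List Char) :
    PySem.Chars.join ['.'] (qs ++ [y]) = PySem.Chars.join ['.'] qs ++ '.' :: y := by
  induction qs with
  | nil => exact absurd rfl hq
  | cons p qs' ih =>
    cases qs' with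
    | nil =>
      rw [show (([p] : List (List Char)) ++ [y]) = [p, y] by rfl, PySem.Chars.join_cons_cons,
        PySem.Chars.join_singleton, PySem.Chars.join_singleton]
      simp
    | cons q qs'' =>
      rw [show ((p :: q :: qs'') ++ [y]) = p :: ((q :: qs'') ++ [y]) by rfl]
      rw [show ((q :: qs'') ++ [y]) = q :: (qs'' ++ [y]) by rfl, PySem.Chars.join_cons_cons,
        show (q :: (qs'' ++ [y])) = (q :: qs'') ++ [y] by rfl]
      rw [ih (by simp), PySem.Chars.join_cons_cons]
      simp

theorem pvRsplitHead_concat (p y : List Char) (hy : '.' ∉ y) :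
    pvRsplitHead (p ++ '.' :: y) = p := by
  unfold pvRsplitHead
  have h1 : (p ++ '.' :: y).reverse = (y.reverse ++ ['.']) ++ p.reverse := by
    simp
  rw [h1]
  have h2 : List.dropWhile (fun c => c != '.') (y.reverse ++ ['.']) = ['.'] := by
    rw [List.dropWhile_append]
    have : List.dropWhile (fun c => c != '.') y.reverse = [] := by
      rw [List.dropWhile_eq_nil_iff]
      intro c hc
      simp only [bne_iff_ne, ne_eq]
      intro hcc; subst hcc
      exact hy (List.mem_reverse.mp hc)
    simp [this, List.dropWhile]
  rw [List.dropWhile_append, h2]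
  simp

theorem pvFoldl_some (items_dict : List (String × String)) (partes : List (List Char))
    (r : String) (l : List Int) :
    l.foldl (pvAstep items_dict partes) (some r) = some r := by
  induction l with
  | nil => rfl
  | cons i l' ih => simpa [pvAstep] using ih

theorem pvMain (items_dict : List (String × String)) :
    ∀ (n : Nat) (ps : List (List Char)), ps.length = n → ps ≠ [] →
    (∀ p ∈ ps, '.' ∉ p) →
    pvBgo items_dict (PySem.Chars.join ['.'] ps)
      = (PySem.List.pyRange ((ps.length : Int) - 1) 0 (-1)).foldl (pvAstep items_dict ps) none := by
  intro n
  induction n using Nat.strong_induction_on with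
  | _ n ih =>
    intro ps hlen hne hnd
    obtain rfl | ⟨qs, y, rfl⟩ := List.eq_nil_or_concat ps
    · exact absurd rfl hne
    simp only [List.concat_eq_append] at hlen hne hnd ⊢
    cases hqs : qs with
    | nil =>
      subst hqs
      have hy : '.' ∉ y := hnd y (by simp)
      rw [show (([] : List (List Char)) ++ [y]) = [y] by rfl, PySem.Chars.join_singleton]
      rw [pvBgo]
      have hfalse : PySem.Chars.isIn ['.'] y = false := by
        rcases h : PySem.Chars.isIn ['.'] y with _ | _
        · rfl
        · exfalso
          have := (PySem.Chars.isIn_iff_infix ['.'] y).mp h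
          exact hy (this.subset (by simp))
      rw [dif_pos hfalse]
      rw [show ((([y] : List (List Char)).length : Int) - 1) = 0 by simp]
      rw [PySem.List.pyRange_neg_one_eq_nil (by omega)]
      rfl
    | cons q qs' =>
      subst hqs
      set qs := q :: qs' with hqsdef
      have hqne : qs ≠ [] := by simp [hqsdef]
      have hm : 0 < qs.length := List.length_pos_iff.mpr hqne
      have hy : '.' ∉ y := hnd y (by simp)
      have hndq : ∀ p ∈ qs, '.' ∉ p := fun p hp => hnd p (by simp [hp])
      rw [pvJoin_concat qs hqne y]
      rw [pvBgo]
      have hdot : '.' ∈ PySem.Chars.join ['.'] qs ++ '.' :: y := by simp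
      rw [dif_neg (by simp [pvMemIsIn _ hdot])]
      simp only [pvRsplitHead_concat _ _ hy]
      -- right-hand side: peel the first index, qs.length
      have hlen2 : ((qs ++ [y]).length : Int) - 1 = (qs.length : Int) := by simp
      rw [hlen2, PySem.List.pyRange_neg_one_cons (by exact_mod_cast hm), List.foldl_cons]
      have hslice : PySem.List.slice (qs ++ [y]) none (some (qs.length : Int))
          = qs := by
        rw [PySem.List.slice_to _ (by positivity)]
        simp
      have hcand : pvAstep items_dict (qs ++ [y]) none (qs.length : Int)
          = if items_dict.any (fun p => p.1.toList == PySem.Chars.join ['.'] qs)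
            then some (String.ofList (PySem.Chars.join ['.'] qs)) else none := by
        simp [pvAstep]
        rw [hslice]
      rw [hcand]
      by_cases hmem : items_dict.any (fun p => p.1.toList == PySem.Chars.join ['.'] qs) = true
      · rw [if_pos hmem, if_pos hmem, pvFoldl_some]
      · rw [if_neg hmem, if_neg hmem]
        -- remaining indices only look at prefixes of qs
        have hcongr : (PySem.List.pyRange ((qs.length : Int) - 1) 0 (-1)).foldl
              (pvAstep items_dict (qs ++ [y])) none
            = (PySem.List.pyRange ((qs.length : Int) - 1) 0 (-1)).foldl
              (pvAstep items_dict qs) none := by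
          apply PySem.List.foldl_congr_mem
          intro acc x hx
          have hxr := PySem.List.mem_pyRange_neg_one.mp hx
          have hx0 : 0 ≤ x := by omega
          have hxle : x.toNat ≤ qs.length := by omega
          unfold pvAstep
          cases acc with
          | some r => rfl
          | none =>
            rw [PySem.List.slice_to _ hx0, PySem.List.slice_to _ hx0,
              List.take_append_of_le_length hxle]
        rw [hcongr]
        have hlt : qs.length < n := by simp at hlen; omega
        rw [← ih qs.length hlt qs rfl hqne hndq]

-- ===== VERDICT (by name: the statement is the Claim_ definition above) =====
theorem deduzir_pai_spec : Claim_equal_deduzir_pai := by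
  intro codigo items_dict _
  unfold Spec_deduzir_pai deduzir_pai deduzir_pai_alt
  by_cases h : PySem.Chars.isIn ['.'] codigo.toList = false
  · rw [if_pos h, pvBgo, dif_pos h]
  · rw [if_neg h]
    simp only [splitOn_eq_pvSp]
    rw [show pvBgo items_dict codigo.toList
          = pvBgo items_dict (PySem.Chars.join ['.'] (pvSp codigo.toList)) by
        rw [join_pvSp]]
    exact (pvMain items_dict (pvSp codigo.toList).length (pvSp codigo.toList) rfl
      (pvSp_ne_nil _) (pvSp_no_dot _)).symm
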